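-- pv_equiv track=rewrite | github.com/akram0zaki/nonograms-repo | backend/app/core/crud.py | calculate_descriptors
-- ===== SOURCE A (Python) =====
-- from typing import List, Dict, Optional, Tuple, Any
--
-- def calculate_descriptors(board: List[List[bool]]) -> Dict[str, List[List[int]]]:
--     """Calculate row and column descriptors from a board"""
--     if not board or not board[0]:
--         return {"rows": [], "columns": []}
--
--     rows = len(board)
--     cols = len(board[0])
--
--     # Calculate row descriptors
--     row_descriptors = []
--     for r in range(rows):
--         row_desc = []
--         count = 0
--         for c in range(cols):
--             if board[r][c]:  # If cell is filled
--                 count += 1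
--             elif count > 0:  # If we have a filled sequence that just ended
--                 row_desc.append(count)
--                 count = 0
--
--         # Handle case where sequence continues to the end of the row
--         if count > 0:
--             row_desc.append(count)
--
--         # If row is empty, add a 0
--         if not row_desc:
--             row_desc = [0]
--
--         row_descriptors.append(row_desc)
--
--     # Calculate column descriptors
--     col_descriptors = []
--     for c in range(cols):
--         col_desc = []
--         count = 0
--         for r in range(rows):
--             if board[r][c]:  # If cell is filled
--                 count += 1
--             elif count > 0:  # If we have a filled sequence that just ended
--                 col_desc.append(count)
--                 count = 0
--
--         # Handle case where sequence continues to the end of the column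
--         if count > 0:
--             col_desc.append(count)
--
--         # If column is empty, add a 0
--         if not col_desc:
--             col_desc = [0]
--
--         col_descriptors.append(col_desc)
--
--     return {
--         "rows": row_descriptors,
--         "columns": col_descriptors
--     }
-- ===== SOURCE B (Python) =====
-- from typing import List, Dict
--
--
-- def _runs(line):
--     """Run-lengths of filled cells: encode as '1'/'0' string, split on '0',
--     keep the nonempty pieces' lengths; [0] if the line has no filled cell."""
--     bits = ''.join('1' if cell else '0' for cell in line)
--     return [len(seg) for seg in bits.split('0') if seg] or [0]
--
--
-- def calculate_descriptors(board: List[List[bool]]) -> Dict[str, List[List[int]]]: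
--     if not board or not board[0]:
--         return {"rows": [], "columns": []}
--     cols = len(board[0])
--     return {
--         "rows": [_runs(row[:cols]) for row in board],
--         "columns": [_runs([row[c] for row in board]) for c in range(cols)],
--     }
-- ===== Notes on version B (the rewrite author's own statement) =====
-- stated objective: idiomatic
-- what changed: Replaces A's manual count/flush accumulator loops with a split-based encoding: each line is rendered as a '1'/'0' string, split on '0', and the nonempty segments' lengths are the runs; rows and columns become two comprehensions over this helper.
import Mathlib
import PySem

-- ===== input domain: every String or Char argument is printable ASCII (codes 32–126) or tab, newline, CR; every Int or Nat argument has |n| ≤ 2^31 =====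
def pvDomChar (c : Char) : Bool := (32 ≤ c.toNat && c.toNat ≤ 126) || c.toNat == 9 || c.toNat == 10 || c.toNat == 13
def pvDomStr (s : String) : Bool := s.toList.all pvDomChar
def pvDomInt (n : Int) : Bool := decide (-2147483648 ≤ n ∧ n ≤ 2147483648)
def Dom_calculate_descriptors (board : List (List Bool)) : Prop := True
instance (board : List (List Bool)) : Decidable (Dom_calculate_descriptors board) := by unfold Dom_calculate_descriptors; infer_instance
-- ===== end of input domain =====

-- B replaces A's two manual count/flush accumulator loops with a split-based encoding:
-- each line becomes a '1'/'0' string, split on '0'; the nonempty segments' lengths are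
-- the runs (objective: idiomatic).
-- ===== PORT A =====
-- A's inner count/flush loop body (board[r][c]: in range on Pre_, so getD is exact)
def pvStepA (st : List Int × Int) (b : Bool) : List Int × Int :=
  if b then (st.1, st.2 + 1)
  else if st.2 > 0 then (st.1 ++ [st.2], 0) else st

-- flush trailing run, then the empty-line default [0]
def pvFinishA (st : List Int × Int) : List Int :=
  let desc := if st.2 > 0 then st.1 ++ [st.2] else st.1
  if desc = [] then [0] else desc

def calculate_descriptors (board : List (List Bool)) : List (String × List (List Int)) :=
  if board = [] ∨ board.headD [] = [] then [("rows", []), ("columns", [])]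
  else
    let rows := board.length
    let cols := (board.headD []).length
    let row_descriptors := (List.range rows).map (fun r =>
      pvFinishA ((List.range cols).foldl
        (fun st c => pvStepA st ((board.getD r []).getD c false)) ([], 0)))
    let col_descriptors := (List.range cols).map (fun c =>
      pvFinishA ((List.range rows).foldl
        (fun st r => pvStepA st ((board.getD r []).getD c false)) ([], 0)))
    [("rows", row_descriptors), ("columns", col_descriptors)]

-- ===== PORT B =====
-- Source B's _runs: encode the line as '1'/'0' characters, split on '0' (Python str.split
-- keeps empty pieces; List.splitOn is the corresponding Lean function), keep the
-- nonempty pieces' lengths, default [0]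
def pvLineRuns (line : List Bool) : List Int :=
  let bits := line.map (fun cell => if cell then '1' else '0')
  let runs := ((bits.splitOn '0').filter (· ≠ [])).map (fun seg => (seg.length : Int))
  if runs = [] then [0] else runs

def calculate_descriptors_alt (board : List (List Bool)) : List (String × List (List Int)) :=
  if board = [] ∨ board.headD [] = [] then [("rows", []), ("columns", [])]
  else
    let cols := (board.headD []).length
    [("rows", board.map (fun row => pvLineRuns (row.take cols))),
     ("columns", (List.range cols).map (fun c =>
        pvLineRuns (board.map (fun row => row.getD c false))))]

-- ===== PRECONDITION & SPEC =====
-- Pre_ excludes exactly the ragged boards on which the Python A raises IndexError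
-- (some row shorter than the nonempty first row); B raises the same IndexError there.
def Pre_calculate_descriptors (board : List (List Bool)) : Prop :=
  board = [] ∨ board.headD [] = [] ∨ ∀ row ∈ board, (board.headD []).length ≤ row.length
instance (board : List (List Bool)) : Decidable (Pre_calculate_descriptors board) := by
  unfold Pre_calculate_descriptors; infer_instance

def pvWitness_calculate_descriptors : List (List Bool) := [[true, false], [false, true]]

def Spec_calculate_descriptors (board : List (List Bool)) (out : List (String × List (List Int))) : Prop := out = calculate_descriptors_alt board
instance (board : List (List Bool)) (out : List (String × List (List Int))) : Decidable (Spec_calculate_descriptors board out) := by unfold Spec_calculate_descriptors; infer_instance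

-- ===== CLAIM (what is proved, stated in full; the proofs are below) =====
def Claim_equal_calculate_descriptors : Prop := ∀ (board : List (List Bool)), Dom_calculate_descriptors board → Pre_calculate_descriptors board → Spec_calculate_descriptors board (calculate_descriptors board)

-- ===== LEMMAS AND PROOFS =====

-- run lengths read off a segment list: nonempty segments' lengths
def pvRunsOf (segs : List (List Char)) : List Int :=
  (segs.filter (· ≠ [])).map (fun seg => (seg.length : Int))

-- same, but the first segment is continued by a pending count
def pvRunsFrom (count : Int) : List (List Char) → List Int
  | [] => []
  | s :: rest => if count + s.length > 0 then (count + s.length) :: pvRunsOf rest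
                 else pvRunsOf rest

theorem pvRunsFrom_zero (segs : List (List Char)) : pvRunsFrom 0 segs = pvRunsOf segs := by
  cases segs with
  | nil => simp [pvRunsFrom, pvRunsOf]
  | cons s rest =>
    by_cases hs : s = []
    · simp [pvRunsFrom, pvRunsOf, hs]
    · have : s.length > 0 := List.length_pos_iff.mpr hs
      simp [pvRunsFrom, pvRunsOf, hs]

-- A's count/flush fold over a line, in terms of B's split of the '1'/'0' encoding
theorem pvFold_split (line : List Bool) : ∀ (desc : List Int) (count : Int), 0 ≤ count →
    pvFinishA (line.foldl pvStepA (desc, count)) =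
      (let runs := desc ++ pvRunsFrom count
        ((line.map (fun cell => if cell then '1' else '0')).splitOn '0')
       if runs = [] then [0] else runs) := by
  induction line with
  | nil =>
    intro desc count hc
    simp only [List.map_nil, List.splitOn_nil, List.foldl_nil]
    by_cases h : count > 0
    · simp [pvFinishA, pvRunsFrom, pvRunsOf, h]
    · have hc0 : count = 0 := by omega
      simp [pvFinishA, pvRunsFrom, pvRunsOf, hc0]
  | cons b rest ih =>
    intro desc count hc
    cases b with
    | false =>
      have hsplit : ((('0' : Char) :: rest.map (fun cell => if cell then '1' else '0')).splitOn '0')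
          = [] :: (rest.map (fun cell => if cell then '1' else '0')).splitOn '0' := by
        simp [List.splitOn, List.splitOnP_cons]
      simp only [List.map_cons, List.foldl_cons, Bool.false_eq_true, reduceIte, hsplit]
      by_cases h : count > 0
      · have hih := ih (desc ++ [count]) 0 le_rfl
        simp only [pvStepA, Bool.false_eq_true, reduceIte, if_pos h]
        rw [hih, pvRunsFrom_zero]
        simp [pvRunsFrom, h]
      · have hc0 : count = 0 := by omega
        have hih := ih desc 0 le_rfl
        simp only [pvStepA, Bool.false_eq_true, reduceIte, hc0, if_neg (by decide : ¬ ((0 : Int) > 0))]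
        rw [hih, pvRunsFrom_zero, pvRunsFrom_zero]
        simp [pvRunsOf]
    | true =>
      have hsplit : ((('1' : Char) :: rest.map (fun cell => if cell then '1' else '0')).splitOn '0')
          = ((rest.map (fun cell => if cell then '1' else '0')).splitOn '0').modifyHead
              (List.cons '1') := by
        simp [List.splitOn, List.splitOnP_cons]
      obtain ⟨h, t, heq⟩ := List.exists_cons_of_ne_nil
        (show (rest.map (fun cell => if cell then '1' else '0')).splitOn '0' ≠ [] from by
          simp only [List.splitOn]; exact List.splitOnP_ne_nil _ _)
      simp only [List.map_cons, List.foldl_cons, reduceIte, hsplit, heq, List.modifyHead_cons]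
      have hih := ih desc (count + 1) (by omega)
      rw [heq] at hih
      simp only [pvStepA, reduceIte] at hih ⊢
      rw [hih]
      have h1 : count + 1 + (h.length : Int) > 0 := by omega
      have h2 : count + ((('1' :: h).length : Nat) : Int) > 0 := by
        simp only [List.length_cons]; push_cast; omega
      simp only [pvRunsFrom, if_pos h1, if_pos h2]
      have : count + ((('1' :: h).length : Nat) : Int) = count + 1 + (h.length : Int) := by
        simp only [List.length_cons]; push_cast; ring
      rw [this]

theorem pvFinishA_eq_lineRuns (line : List Bool) :
    pvFinishA (line.foldl pvStepA ([], 0)) = pvLineRuns line := by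
  have h := pvFold_split line [] 0 le_rfl
  simpa [pvLineRuns, pvRunsFrom_zero, pvRunsOf] using h

-- fold over range n of l.getD = fold over l.take n (n within bounds)
theorem pvFoldRange_getD {S : Type} (f : S → Bool → S) (l : List Bool) :
    ∀ (n : Nat) (s : S), n ≤ l.length →
    (List.range n).foldl (fun st c => f st (l.getD c false)) s = (l.take n).foldl f s := by
  intro n
  induction n with
  | zero => simp
  | succ m ih =>
    intro s hm
    have hm' : m < l.length := by omega
    rw [List.range_succ, List.foldl_append, ih s (by omega)]
    rw [List.take_add_one, List.foldl_append]
    simp [List.getElem?_eq_getElem hm', List.getD]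

theorem pvMapRange_getD {α β : Type} (l : List α) (d : α) (f : α → β) :
    (List.range l.length).map (fun r => f (l.getD r d)) = l.map f := by
  apply List.ext_getElem
  · simp
  · intro i h1 h2
    simp at h1 ⊢
    simp [List.getElem?_eq_getElem h1]

-- ===== VERDICT (by name: the statement is the Claim_ definition above) =====
theorem calculate_descriptors_spec : Claim_equal_calculate_descriptors := by
  intro board _ hpre
  unfold Spec_calculate_descriptors calculate_descriptors calculate_descriptors_alt
  by_cases hg : board = [] ∨ board.headD [] = []
  · rw [if_pos hg, if_pos hg]
  · rw [if_neg hg, if_neg hg]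
    have hg1 : board ≠ [] := fun h => hg (Or.inl h)
    have hg2 : board.headD [] ≠ [] := fun h => hg (Or.inr h)
    rcases hpre with h | h | hrect
    · exact absurd h hg1
    · exact absurd h hg2
    simp only [List.cons.injEq, Prod.mk.injEq, and_true, true_and]
    refine ⟨?_, ?_⟩
    · -- rows
      rw [← pvMapRange_getD board [] (fun row => pvLineRuns (row.take (board.headD []).length))]
      apply List.map_congr_left
      intro r hr
      have hr' : r < board.length := List.mem_range.mp hr
      have hrow : board.getD r [] ∈ board := by
        rw [List.getD_eq_getElem board [] hr']; exact List.getElem_mem hr'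
      rw [pvFoldRange_getD pvStepA (board.getD r []) _ _ (hrect _ hrow)]
      exact pvFinishA_eq_lineRuns _
    · -- columns
      apply List.map_congr_left
      intro c hc
      have hc' : c < (board.headD []).length := List.mem_range.mp hc
      have hlen : board.length ≤ (board.map (fun row => row.getD c false)).length := by simp
      have := pvFoldRange_getD pvStepA (board.map (fun row => row.getD c false))
        board.length ([], 0) hlen
      rw [← pvFinishA_eq_lineRuns]
      rw [List.take_of_length_le (by simp)] at this
      rw [← this]
      congr 1
      apply PySem.List.foldl_congr_mem
      intro st x hx
      have hr : x < board.length := List.mem_range.mp hx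
      congr 1
      rw [List.getD_eq_getElem _ _ (by simp [hr] : x < (board.map (fun row => row.getD c false)).length)]
      simp [List.getD, List.getElem?_eq_getElem hr]
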